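-- pv_equiv track=rewrite | github.com/raj-iup/cp-whisperx-app | scripts/08_lyrics_detection.py | detect_lyrics_simple
-- ===== SOURCE A (Python) =====
-- def detect_lyrics_simple(text: str) -> bool:
--     """
--     Simple lyrics detection heuristic.
--
--     Args:
--         text: Segment text
--
--     Returns:
--         True if likely lyrics
--     """
--     # Simple heuristics for lyrics detection
--     lyrics_patterns = [
--         'la la la',
--         'na na na',
--         'ho ho ho',
--         'sha la la',
--         'doo doo doo',
--         'oh oh oh',
--         'yeah yeah yeah',
--     ]
--
--     text_lower = text.lower()
--
--     # Check for repetitive patterns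
--     if any(pattern in text_lower for pattern in lyrics_patterns):
--         return True
--
--     # Check for high repetition
--     words = text_lower.split()
--     if len(words) > 3:
--         word_counts = {}
--         for word in words:
--             word_counts[word] = word_counts.get(word, 0) + 1
--
--         # If any word repeats 3+ times in short segment, likely lyrics
--         if any(count >= 3 for count in word_counts.values()):
--             return True
--
--     return False
-- ===== SOURCE B (Python) =====
-- def detect_lyrics_simple(text: str) -> bool:
--     """Lyrics heuristic: same pattern scan, but the repetition check sorts
--     the words and looks for three equal words in a row (ws[i] == ws[i+2])
--     instead of building a frequency dict."""
--     lyrics_patterns = [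
--         'la la la',
--         'na na na',
--         'ho ho ho',
--         'sha la la',
--         'doo doo doo',
--         'oh oh oh',
--         'yeah yeah yeah',
--     ]
--     text_lower = text.lower()
--     if any(pattern in text_lower for pattern in lyrics_patterns):
--         return True
--     words = text_lower.split()
--     if len(words) > 3:
--         ws = sorted(words)
--         for i in range(len(ws) - 2):
--             if ws[i] == ws[i + 2]:
--                 return True
--     return False
-- ===== Notes on version B (the rewrite author's own statement) =====
-- stated objective: alternative
-- what changed: The repetition check no longer builds a word-frequency dict: B sorts the word list and scans it once for three equal words in a row (ws[i] == ws[i+2]); the pattern scan is unchanged.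
import Mathlib
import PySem

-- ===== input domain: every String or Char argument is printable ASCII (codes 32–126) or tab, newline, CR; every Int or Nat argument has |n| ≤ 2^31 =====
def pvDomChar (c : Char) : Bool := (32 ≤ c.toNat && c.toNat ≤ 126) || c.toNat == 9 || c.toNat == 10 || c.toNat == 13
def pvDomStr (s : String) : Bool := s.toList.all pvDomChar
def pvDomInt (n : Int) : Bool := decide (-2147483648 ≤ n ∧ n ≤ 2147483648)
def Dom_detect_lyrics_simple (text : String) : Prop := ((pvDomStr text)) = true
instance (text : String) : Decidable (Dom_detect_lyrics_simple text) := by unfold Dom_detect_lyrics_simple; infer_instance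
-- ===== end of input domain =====

-- B replaces A's frequency-dict repetition check by sorting the words and looking for
-- three equal words in a row; same return value (objective: alternative, no speed claim).

-- ===== PORT A =====
def lyricsPatterns : List String :=
  ["la la la", "na na na", "ho ho ho", "sha la la", "doo doo doo", "oh oh oh", "yeah yeah yeah"]

def detect_lyrics_simple (text : String) : Bool :=
  let text_lower := PySem.Str.lower text
  if lyricsPatterns.any (fun pattern => PySem.Str.isIn pattern text_lower) then
    true
  else
    let words := PySem.Str.split₀ text_lower
    if words.length > 3 then
      let word_counts := words.foldl (fun d word => d.insert word (d.getD word 0 + 1))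
        (PySem.Dict.empty : PySem.Dict String Int)
      if word_counts.values.any (fun count => decide (3 ≤ count)) then true else false
    else
      false

-- ===== PORT B =====
def detect_lyrics_simple_alt (text : String) : Bool :=
  let text_lower := PySem.Str.lower text
  if lyricsPatterns.any (fun pattern => PySem.Str.isIn pattern text_lower) then
    true
  else
    let words := PySem.Str.split₀ text_lower
    if words.length > 3 then
      let ws := PySem.List.sorted words (fun w => w)
      -- 'for i in range(len(ws) - 2): if ws[i] == ws[i+2]: return True' as .any
      (PySem.List.pyRange 0 ((ws.length : Int) - 2)).any
        (fun i => PySem.List.pyGetD ws i "" == PySem.List.pyGetD ws (i + 2) "")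
    else
      false

-- ===== PRECONDITION & SPEC =====
def Spec_detect_lyrics_simple (text : String) (out : Bool) : Prop := out = detect_lyrics_simple_alt text
instance (text : String) (out : Bool) : Decidable (Spec_detect_lyrics_simple text out) := by unfold Spec_detect_lyrics_simple; infer_instance

-- ===== CLAIM (what is proved, stated in full; the proofs are below) =====
def Claim_equal_detect_lyrics_simple : Prop := ∀ (text : String), Dom_detect_lyrics_simple text → Spec_detect_lyrics_simple text (detect_lyrics_simple text)

-- ===== LEMMAS AND PROOFS =====

-- a run ws[j] = ws[j+2] in a sorted list forces three equal consecutive words, hence a count >= 3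
lemma count_ge_three_of_run (ws : List String) (hp : List.Pairwise (· ≤ ·) ws) {j : Nat}
    (h : j + 2 < ws.length)
    (heq : ws[j]'(by omega) = ws[j+2]'h) :
    ∃ w, 3 ≤ ws.count w := by
  have h1 : ws[j+1]'(by omega) = ws[j]'(by omega) := by
    have a1 := List.pairwise_iff_getElem.mp hp j (j+1) (by omega) (by omega) (by omega)
    have a2 := List.pairwise_iff_getElem.mp hp (j+1) (j+2) (by omega) h (by omega)
    rw [heq] at a1
    exact le_antisymm a2 a1 |>.trans heq.symm
  have hdrop : ws.drop j = ws[j]'(by omega) :: ws[j]'(by omega) :: ws[j]'(by omega) :: ws.drop (j+3) := by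
    rw [List.drop_eq_getElem_cons (by omega : j < ws.length),
        List.drop_eq_getElem_cons (by omega : j + 1 < ws.length),
        List.drop_eq_getElem_cons (by omega : j + 2 < ws.length)]
    rw [h1, ← heq]
  refine ⟨ws[j]'(by omega), le_trans ?_ (List.Sublist.count_le _ (List.drop_sublist j ws))⟩
  rw [hdrop]
  simp

-- a word with count >= 3 in a sorted list yields a run ws[j] = ws[j+2]
lemma run_of_count_ge_three (ws : List String) (hp : List.Pairwise (· ≤ ·) ws) {w : String}
    (hw : 3 ≤ ws.count w) :
    ∃ j, ∃ h : j + 2 < ws.length, ws[j]'(by omega) = ws[j+2]'h := by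
  have hsub : List.Sublist (List.replicate 3 w) ws := List.replicate_sublist_iff.mpr hw
  obtain ⟨is, his, hpw⟩ := List.sublist_eq_map_getElem hsub
  have hlen : is.length = 3 := by simpa using (congrArg List.length his).symm
  obtain ⟨i1, i2, i3, rfl⟩ := List.length_eq_three.mp hlen
  simp only [List.map_cons, List.map_nil, List.replicate, List.cons.injEq, and_true] at his
  obtain ⟨e1, e2, e3⟩ := his
  simp only [Fin.getElem_fin] at e1 e3
  simp only [List.pairwise_cons, List.mem_cons, List.not_mem_nil] at hpw
  have h12 : (i1 : Nat) < (i2 : Nat) := hpw.1 i2 (by simp)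
  have h23 : (i2 : Nat) < (i3 : Nat) := hpw.2.1 i3 (by simp)
  have hi3 : (i3 : Nat) < ws.length := i3.isLt
  have hj : (i1 : Nat) + 2 < ws.length := by omega
  refine ⟨(i1 : Nat), hj, ?_⟩
  have e13 : ws[(i1 : Nat)]'(by omega) = ws[(i3 : Nat)]'hi3 := by rw [← e1, ← e3]
  have a1 := List.pairwise_iff_getElem.mp hp (i1 : Nat) ((i1 : Nat) + 2) (by omega) hj (by omega)
  have a2 : ws[(i1 : Nat) + 2]'hj ≤ ws[(i1 : Nat)]'(by omega) := by
    rw [e13]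
    rcases eq_or_lt_of_le (show (i1 : Nat) + 2 ≤ (i3 : Nat) by omega) with heq3 | hlt3
    · exact le_of_eq (by simp only [heq3])
    · exact List.pairwise_iff_getElem.mp hp ((i1 : Nat) + 2) (i3 : Nat) (by omega) hi3 hlt3
  exact le_antisymm a1 a2

-- the two repetition checks agree on every word list
lemma inner_eq (l : List String) :
    ((l.foldl (fun d word => d.insert word (d.getD word 0 + 1))
        (PySem.Dict.empty : PySem.Dict String Int)).values.any (fun count => decide (3 ≤ count)))
    = ((PySem.List.pyRange 0 (((PySem.List.sorted l (fun w => w)).length : Int) - 2)).any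
        (fun i => PySem.List.pyGetD (PySem.List.sorted l (fun w => w)) i ""
          == PySem.List.pyGetD (PySem.List.sorted l (fun w => w)) (i + 2) "")) := by
  have hpair : List.Pairwise (· ≤ ·) (PySem.List.sorted l (fun w => w)) :=
    PySem.List.sorted_pairwise l (fun w => w)
  have hperm : ∀ a : String, (PySem.List.sorted l (fun w => w)).count a = l.count a :=
    fun a => (PySem.List.sorted_perm l (fun w => w) false).count_eq a
  rw [PySem.Dict.foldl_insert_getD_add_one_eq_counter, Bool.eq_iff_iff]
  constructor
  · intro hA
    rw [PySem.Dict.values_eq_map_keys _ (PySem.Dict.nodup_keys_counter l) 0, List.any_map,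
      List.any_eq_true] at hA
    obtain ⟨k, hk, hkc⟩ := hA
    simp only [Function.comp, PySem.Dict.getD_counter, decide_eq_true_eq] at hkc
    have hcount : 3 ≤ (PySem.List.sorted l (fun w => w)).count k := by
      rw [hperm k]; exact_mod_cast hkc
    obtain ⟨j, h, heq⟩ := run_of_count_ge_three _ hpair hcount
    rw [List.any_eq_true]
    refine ⟨(j : Int), ?_, ?_⟩
    · rw [PySem.List.mem_pyRange_one]
      exact ⟨Int.natCast_nonneg j, by omega⟩
    · rw [beq_iff_eq,
        PySem.List.pyGetD_eq_getElem _ "" (Int.natCast_nonneg j) (by omega),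
        PySem.List.pyGetD_eq_getElem _ "" (by positivity) (by omega)]
      have t1 : ((j : Int)).toNat = j := by omega
      have t2 : ((j : Int) + 2).toNat = j + 2 := by omega
      simp only [t1, t2]
      exact heq
  · intro hB
    rw [List.any_eq_true] at hB
    obtain ⟨i, hi, heq⟩ := hB
    rw [PySem.List.mem_pyRange_one] at hi
    obtain ⟨hi0, hi2⟩ := hi
    rw [beq_iff_eq,
      PySem.List.pyGetD_eq_getElem _ "" (by omega) (by omega),
      PySem.List.pyGetD_eq_getElem _ "" (by omega) (by omega)] at heq
    have t2 : (i + 2).toNat = i.toNat + 2 := by omega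
    simp only [t2] at heq
    have hrun : i.toNat + 2 < (PySem.List.sorted l (fun w => w)).length := by omega
    obtain ⟨w, hw⟩ := count_ge_three_of_run _ hpair hrun heq
    rw [PySem.Dict.values_eq_map_keys _ (PySem.Dict.nodup_keys_counter l) 0, List.any_map,
      List.any_eq_true]
    rw [hperm w] at hw
    refine ⟨w, ?_, ?_⟩
    · rw [PySem.Dict.keys_counter]
      exact (PySem.Set.mem_ofList l w).mpr (List.count_pos_iff.mp (by omega))
    · simp only [Function.comp, PySem.Dict.getD_counter, decide_eq_true_eq]
      exact_mod_cast hw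

-- ===== VERDICT (by name: the statement is the Claim_ definition above) =====
theorem detect_lyrics_simple_spec : Claim_equal_detect_lyrics_simple := by
  intro text _
  unfold Spec_detect_lyrics_simple detect_lyrics_simple detect_lyrics_simple_alt
  by_cases hc : lyricsPatterns.any (fun pattern => PySem.Str.isIn pattern (PySem.Str.lower text)) = true
  · simp only [hc, if_true]
  · simp only [Bool.not_eq_true] at hc
    simp only [hc, Bool.false_eq_true, if_false]
    by_cases hl : (PySem.Str.split₀ (PySem.Str.lower text)).length > 3
    · simp only [hl, if_true]
      rw [inner_eq]
      cases hb : ((PySem.List.pyRange 0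
          (((PySem.List.sorted (PySem.Str.split₀ (PySem.Str.lower text)) (fun w => w)).length : Int) - 2)).any
          (fun i => PySem.List.pyGetD (PySem.List.sorted (PySem.Str.split₀ (PySem.Str.lower text)) (fun w => w)) i ""
            == PySem.List.pyGetD (PySem.List.sorted (PySem.Str.split₀ (PySem.Str.lower text)) (fun w => w)) (i + 2) "")) <;>
        simp
    · simp only [hl, if_false]
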